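-- pv_equiv track=rewrite | github.com/Windsooon/LeetCode | Maximal Rectangle.py | helper
-- ===== SOURCE A (Python) =====
-- def helper(matrix):
--     pre = matrix[0]
--     after = [pre]
--     for i in range(1, len(matrix)):
--         cur = []
--         for j in range(len(pre)):
--             if matrix[i][j] == '0':
--                 cur.append(str(0))
--             else:
--                 cur.append(str(1+int(pre[j])))
--         after.append(cur)
--         pre = cur
--     return after
-- ===== SOURCE B (Python) =====
-- def helper(matrix):
--     # Column-major reformulation: run the height recurrence down each column
--     # (seeded from row 0, resetting on '0'), then transpose the column scans back.
--     first = matrix[0]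
--     rest = matrix[1:]
--     cols = []
--     for j in range(len(first)):
--         prev = first[j]
--         col = []
--         for row in rest:
--             prev = '0' if row[j] == '0' else str(1 + int(prev))
--             col.append(prev)
--         cols.append(col)
--     return [first] + [[col[i] for col in cols] for i in range(len(rest))]
-- ===== Notes on version B (the rewrite author's own statement) =====
-- stated objective: alternative
-- what changed: B runs the height recurrence column-major: one scan down each column with a running previous value (reset on '0'), collected into per-column lists that are transposed back, instead of A's row-by-row rebuild of each row from the previous row.
import Mathlib
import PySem

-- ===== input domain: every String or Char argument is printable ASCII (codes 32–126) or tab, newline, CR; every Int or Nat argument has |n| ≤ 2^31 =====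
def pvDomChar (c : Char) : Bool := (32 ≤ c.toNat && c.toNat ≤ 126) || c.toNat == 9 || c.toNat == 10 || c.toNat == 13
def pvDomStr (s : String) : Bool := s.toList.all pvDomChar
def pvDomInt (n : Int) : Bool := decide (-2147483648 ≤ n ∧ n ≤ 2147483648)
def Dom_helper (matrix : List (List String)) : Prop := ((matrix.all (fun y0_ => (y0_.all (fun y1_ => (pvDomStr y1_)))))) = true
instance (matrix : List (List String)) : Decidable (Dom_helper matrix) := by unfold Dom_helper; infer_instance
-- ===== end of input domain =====

-- B builds the same histogram column-major (a scan down each column, then a transpose)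
-- instead of A's row-by-row rebuild; same cost, different pass shape. Return value only
-- (A returns matrix[0] itself as row 0; so does B — no mutation in either).

-- ===== PORT A =====
-- inner loop 'for j in range(len(pre)): cur.append(...)' of A
def helperRow (pre rowI : List String) : List String :=
  (PySem.List.pyRange 0 (pre.length : Int) 1).foldl (fun cur j =>
    if PySem.List.pyGetD rowI j "" == "0" then cur ++ [PySem.Int.toStr 0]
    else cur ++ [PySem.Int.toStr (1 + (PySem.Int.ofStr? (PySem.List.pyGetD pre j "")).getD 0)]) []

def helper (matrix : List (List String)) : List (List String) :=
  match matrix with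
  | [] => []  -- Python raises IndexError on matrix[0]; excluded by Pre_
  | pre0 :: rest =>
    -- 'for i in range(1, len(matrix))' visits exactly the rows of the tail, in order,
    -- carrying (after, pre)
    (rest.foldl (fun (st : List (List String) × List String) rowI =>
      let cur := helperRow st.2 rowI
      (st.1 ++ [cur], cur)) ([pre0], pre0)).1

-- ===== PORT B =====
-- body of B's inner scan: 'prev = "0" if row[j] == "0" else str(1 + int(prev))'
def altStep (j : Int) (prev : String) (row : List String) : String :=
  if PySem.List.pyGetD row j "" == "0" then "0"
  else PySem.Int.toStr (1 + (PySem.Int.ofStr? prev).getD 0)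

-- one column scan of B, state (prev, col)
def altCol (j : Int) (first : List String) (rest : List (List String)) : List String :=
  (rest.foldl (fun (st : String × List String) row =>
    let prev := altStep j st.1 row
    (prev, st.2 ++ [prev])) (PySem.List.pyGetD first j "", [])).2

def helper_alt (matrix : List (List String)) : List (List String) :=
  match matrix with
  | [] => []  -- Python raises IndexError on matrix[0]; excluded by Pre_
  | first :: rest =>
    let cols := (PySem.List.pyRange 0 (first.length : Int) 1).map (fun j => altCol j first rest)
    first :: (PySem.List.pyRange 0 (rest.length : Int) 1).map (fun i =>
      cols.map (fun col => PySem.List.pyGetD col i ""))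

-- ===== PRECONDITION & SPEC =====
-- Pre_ excludes exactly the inputs where the Python A raises: an empty matrix (IndexError on
-- matrix[0]), a later row shorter than row 0 (IndexError on matrix[i][j]), and a row-0 entry
-- that is read by int() (i.e. matrix[1][j] != '0') but is not an int literal (ValueError).
def Pre_helper (matrix : List (List String)) : Prop :=
  matrix ≠ [] ∧
  (∀ r ∈ matrix.tail, (matrix.headD []).length ≤ r.length) ∧
  (matrix.length ≤ 1 ∨ ∀ j ∈ List.range (matrix.headD []).length,
     (matrix.getD 1 []).getD j "" = "0" ∨ (PySem.Int.ofStr? ((matrix.headD []).getD j "")).isSome)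
instance (matrix : List (List String)) : Decidable (Pre_helper matrix) := by
  unfold Pre_helper; infer_instance

def pvWitness_helper : List (List String) := [["1", "0"], ["1", "1"], ["0", "1"]]

def Spec_helper (matrix : List (List String)) (out : List (List String)) : Prop := out = helper_alt matrix
instance (matrix : List (List String)) (out : List (List String)) : Decidable (Spec_helper matrix out) := by unfold Spec_helper; infer_instance

-- ===== CLAIM (what is proved, stated in full; the proofs are below) =====
def Claim_equal_helper : Prop := ∀ (matrix : List (List String)), Dom_helper matrix → Pre_helper matrix → Spec_helper matrix (helper matrix)

-- ===== LEMMAS AND PROOFS =====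

-- the per-cell recurrence both programs compute, Nat-indexed
def pvStep (j : Nat) (prev : String) (row : List String) : String :=
  if row.getD j "" == "0" then "0" else PySem.Int.toStr (1 + (PySem.Int.ofStr? prev).getD 0)

-- A's row sequence: each row from the previous one
def pvRowsA : List String → List (List String) → List (List String)
  | _, [] => []
  | pre, r :: rs => helperRow pre r :: pvRowsA (helperRow pre r) rs

-- B's column scan as a structural recursion
def pvScanB (j : Nat) : String → List (List String) → List String
  | _, [] => []
  | prev, r :: rs => pvStep j prev r :: pvScanB j (pvStep j prev r) rs

theorem altStep_eq (j : Nat) (prev : String) (row : List String) :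
    altStep (j : Int) prev row = pvStep j prev row := by
  simp [altStep, pvStep]

theorem helperRow_eq (pre rowI : List String) :
    helperRow pre rowI = (List.range pre.length).map (fun j => pvStep j (pre.getD j "") rowI) := by
  unfold helperRow
  have hbody : (fun (cur : List String) (j : Int) =>
      if PySem.List.pyGetD rowI j "" == "0" then cur ++ [PySem.Int.toStr 0]
      else cur ++ [PySem.Int.toStr (1 + (PySem.Int.ofStr? (PySem.List.pyGetD pre j "")).getD 0)])
      = (fun cur j => cur ++ [if PySem.List.pyGetD rowI j "" == "0" then PySem.Int.toStr 0
        else PySem.Int.toStr (1 + (PySem.Int.ofStr? (PySem.List.pyGetD pre j "")).getD 0)]) := by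
    funext cur j; split_ifs <;> rfl
  rw [hbody, PySem.List.foldl_append_singleton_eq_map, PySem.List.pyRange_zero_nat, List.map_map]
  refine (List.nil_append _).trans (List.map_congr_left fun j hj => ?_)
  have h0 : PySem.Int.toStr 0 = "0" := rfl
  simp [pvStep, h0]

theorem foldA_eq (rest : List (List String)) (acc : List (List String)) (pre : List String) :
    (rest.foldl (fun (st : List (List String) × List String) rowI =>
      let cur := helperRow st.2 rowI
      (st.1 ++ [cur], cur)) (acc, pre)).1 = acc ++ pvRowsA pre rest := by
  induction rest generalizing acc pre with
  | nil => simp [pvRowsA]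
  | cons r rs ih => simp [pvRowsA, ih]

theorem foldB_eq (j : Nat) (rest : List (List String)) (prev : String) (acc : List String) :
    (rest.foldl (fun (st : String × List String) row =>
      let p := altStep (j : Int) st.1 row
      (p, st.2 ++ [p])) (prev, acc)).2 = acc ++ pvScanB j prev rest := by
  induction rest generalizing prev acc with
  | nil => simp [pvScanB]
  | cons r rs ih =>
    simp only [List.foldl_cons]
    exact (ih _ _).trans (by simp [pvScanB, altStep_eq])

theorem altCol_eq (j : Nat) (first : List String) (rest : List (List String)) :
    altCol (j : Int) first rest = pvScanB j (first.getD j "") rest := by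
  unfold altCol
  rw [foldB_eq]
  simp

theorem length_helperRow (pre rowI : List String) :
    (helperRow pre rowI).length = pre.length := by
  rw [helperRow_eq]; simp

theorem getD_helperRow (pre rowI : List String) (j : Nat) (hj : j < pre.length) :
    (helperRow pre rowI).getD j "" = pvStep j (pre.getD j "") rowI := by
  rw [helperRow_eq, List.getD_eq_getElem _ _ (by simpa using hj)]
  simp [hj]

-- the heart: A's row sequence is the transpose of B's column scans
theorem rowsA_eq_scanB (rest : List (List String)) (pre : List String) :
    pvRowsA pre rest = (List.range rest.length).map (fun i =>
      (List.range pre.length).map (fun j => (pvScanB j (pre.getD j "") rest).getD i "")) := by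
  induction rest generalizing pre with
  | nil => simp [pvRowsA]
  | cons r rs ih =>
    simp only [pvRowsA, List.length_cons, List.range_succ_eq_map, List.map_cons, List.map_map]
    congr 1
    · rw [helperRow_eq]
      refine List.map_congr_left (fun j hj => ?_)
      simp [pvScanB]
    · rw [ih (helperRow pre r), length_helperRow]
      refine List.map_congr_left (fun i hi => ?_)
      simp only [Function.comp_apply]
      refine List.map_congr_left (fun j hj => ?_)
      rw [getD_helperRow pre r j (List.mem_range.mp hj)]
      simp [pvScanB]

theorem helper_eq_alt (matrix : List (List String)) : helper matrix = helper_alt matrix := by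
  match matrix with
  | [] => rfl
  | first :: rest =>
    show (rest.foldl _ ([first], first)).1 = _
    rw [foldA_eq]
    simp only [helper_alt, PySem.List.pyRange_zero_nat, List.map_map]
    rw [rowsA_eq_scanB]
    simp [Function.comp, altCol_eq, PySem.List.pyGetD_natCast]

-- ===== VERDICT (by name: the statement is the Claim_ definition above) =====
theorem helper_spec : Claim_equal_helper := by
  intro matrix _ _
  unfold Spec_helper
  exact helper_eq_alt matrix
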